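-- pv_equiv track=rewrite | github.com/hwijeen/OffensEval2020 | preprocessing.py | add_capital_signs
-- ===== SOURCE A (Python) =====
-- def add_capital_signs(text):
--     def _has_cap(token):
--         return token.lower() != token and token.upper() != token
--
--     def _all_cap(token):
--         return token.lower() != token and token.upper() == token
--
--     exceptions = ['@USER', 'URL']
--     tokens = text.split()
--     tokens = ['<has_cap> ' + t if _has_cap(t) and t not in exceptions else t for t in tokens]
--     tokens = ['<all_cap> ' + t if _all_cap(t) and t not in exceptions else t for t in tokens]
--     return ' '.join(tokens)
-- ===== SOURCE B (Python) =====
-- def add_capital_signs(text):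
--     exceptions = ('@USER', 'URL')
--     out = []
--     for t in text.split():
--         if t in exceptions:
--             out.append(t)
--         elif t.lower() != t and t.upper() != t:
--             out.append('<has_cap> ' + t)
--         elif t.lower() != t and t.upper() == t:
--             out.append('<all_cap> ' + t)
--         else:
--             out.append(t)
--     return ' '.join(out)
-- ===== Notes on version B (the rewrite author's own statement) =====
-- stated objective: simpler
-- what changed: Replaced A's two sequential list-comprehension passes (the second re-testing already-tagged tokens) with one loop over the tokens that classifies each token once via an exception/has_cap/all_cap if-elif chain, relying on the mutual exclusivity of the two predicates.
import Mathlib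
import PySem

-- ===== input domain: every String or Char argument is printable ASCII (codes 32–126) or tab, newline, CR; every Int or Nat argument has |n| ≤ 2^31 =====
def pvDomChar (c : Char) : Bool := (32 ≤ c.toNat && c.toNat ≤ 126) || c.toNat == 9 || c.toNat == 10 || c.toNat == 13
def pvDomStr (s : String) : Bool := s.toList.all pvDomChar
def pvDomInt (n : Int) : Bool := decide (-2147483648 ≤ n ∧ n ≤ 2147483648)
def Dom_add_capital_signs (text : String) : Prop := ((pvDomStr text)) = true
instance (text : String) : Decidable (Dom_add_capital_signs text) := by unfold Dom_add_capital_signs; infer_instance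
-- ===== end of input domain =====

-- B replaces A's two sequential tagging passes with one single-pass if/elif classification per token (simpler; same cost).

-- ===== PORT A =====
def acs_has_cap (token : String) : Bool :=
  (PySem.Str.lower token != token) && (PySem.Str.upper token != token)

def acs_all_cap (token : String) : Bool :=
  (PySem.Str.lower token != token) && (PySem.Str.upper token == token)

def acs_exceptions : List String := ["@USER", "URL"]

def add_capital_signs (text : String) : String :=
  let tokens := PySem.Str.split₀ text
  let tokens := tokens.map (fun t =>
    if acs_has_cap t && !(acs_exceptions.contains t) then "<has_cap> " ++ t else t)
  let tokens := tokens.map (fun t =>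
    if acs_all_cap t && !(acs_exceptions.contains t) then "<all_cap> " ++ t else t)
  PySem.Str.join " " tokens

-- ===== PORT B =====
def acs_exceptions_b : List String := ["@USER", "URL"]

def add_capital_signs_alt (text : String) : String :=
  let out := (PySem.Str.split₀ text).foldl (fun acc t =>
    acc ++ [if acs_exceptions_b.contains t then t
            else if (PySem.Str.lower t != t) && (PySem.Str.upper t != t) then "<has_cap> " ++ t
            else if (PySem.Str.lower t != t) && (PySem.Str.upper t == t) then "<all_cap> " ++ t
            else t]) []
  PySem.Str.join " " out

-- ===== PRECONDITION & SPEC =====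
def Spec_add_capital_signs (text : String) (out : String) : Prop := out = add_capital_signs_alt text
instance (text : String) (out : String) : Decidable (Spec_add_capital_signs text out) := by unfold Spec_add_capital_signs; infer_instance

-- ===== CLAIM (what is proved, stated in full; the proofs are below) =====
def Claim_equal_add_capital_signs : Prop := ∀ (text : String), Dom_add_capital_signs text → Spec_add_capital_signs text (add_capital_signs text)

-- ===== LEMMAS AND PROOFS =====

theorem acs_foldl_append (g : String → String) (l : List String) (acc : List String) :
    List.foldl (fun acc t => acc ++ [g t]) acc l = acc ++ l.map g := by
  induction l generalizing acc with
  | nil => simp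
  | cons x xs ih => simp [List.foldl, ih]

-- the freshly tagged token "<has_cap> " ++ t is never all-caps ('h' stays lowercase under upper)
theorem acs_not_all_cap_tagged (t : String) : acs_all_cap ("<has_cap> " ++ t) = false := by
  have hu : PySem.Str.upper ("<has_cap> " ++ t) ≠ "<has_cap> " ++ t := by
    intro he
    have h2 := congrArg String.toList he
    rw [show (PySem.Str.upper ("<has_cap> " ++ t)).toList
        = PySem.Chars.upper ("<has_cap> ".toList) ++ PySem.Chars.upper t.toList by
      simp [PySem.Str.toList_upper, PySem.Chars.upper]] at h2
    rw [show PySem.Chars.upper ("<has_cap> ".toList) = '<' :: 'H' :: "AS_CAP> ".toList by decide,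
      String.toList_append] at h2
    have h4 := congrArg (fun l => l[1]?) h2
    simp at h4
  simp [acs_all_cap, hu]

set_option maxRecDepth 20000 in
theorem acs_token_eq (t : String) :
    (fun t => if acs_all_cap t && !(acs_exceptions.contains t) then "<all_cap> " ++ t else t)
      ((fun t => if acs_has_cap t && !(acs_exceptions.contains t) then "<has_cap> " ++ t else t) t)
    = (if acs_exceptions_b.contains t then t
       else if (PySem.Str.lower t != t) && (PySem.Str.upper t != t) then "<has_cap> " ++ t
       else if (PySem.Str.lower t != t) && (PySem.Str.upper t == t) then "<all_cap> " ++ t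
       else t) := by
  rw [show acs_exceptions_b = acs_exceptions from rfl]
  beta_reduce
  by_cases hexc : acs_exceptions.contains t = true
  · simp only [acs_exceptions, List.contains_cons, List.contains_nil, Bool.or_eq_true_iff,
      beq_iff_eq] at hexc
    rcases hexc with h | h | h
    · subst h; decide
    · subst h; decide
    · simp at h
  · have hmem : t ∉ acs_exceptions := by simpa using hexc
    by_cases hhas : acs_has_cap t = true
    · have hhas' : ((PySem.Str.lower t != t) && (PySem.Str.upper t != t)) = true := hhas
      simp [hhas, hmem, hhas', acs_not_all_cap_tagged]
    · have h0 : acs_has_cap t = false := by simpa using hhas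
      have h0' : ((PySem.Str.lower t != t) && (PySem.Str.upper t != t)) = false := h0
      simp [h0, h0', hmem, acs_all_cap]

theorem acs_map2 (l : List String) :
    List.map (fun t => if acs_all_cap t && !(acs_exceptions.contains t) then "<all_cap> " ++ t else t)
      (List.map (fun t => if acs_has_cap t && !(acs_exceptions.contains t) then "<has_cap> " ++ t else t) l)
    = List.map (fun t => if acs_exceptions_b.contains t then t
        else if (PySem.Str.lower t != t) && (PySem.Str.upper t != t) then "<has_cap> " ++ t
        else if (PySem.Str.lower t != t) && (PySem.Str.upper t == t) then "<all_cap> " ++ t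
        else t) l := by
  induction l with
  | nil => rfl
  | cons x xs ih =>
    simp only [List.map_cons]
    exact congrArg₂ List.cons (acs_token_eq x) ih

theorem acs_key (l : List String) :
    PySem.Str.join " "
      (List.map (fun t => if acs_all_cap t && !(acs_exceptions.contains t) then "<all_cap> " ++ t else t)
        (List.map (fun t => if acs_has_cap t && !(acs_exceptions.contains t) then "<has_cap> " ++ t else t) l))
    = PySem.Str.join " "
      (List.foldl (fun acc t =>
        acc ++ [if acs_exceptions_b.contains t then t
                else if (PySem.Str.lower t != t) && (PySem.Str.upper t != t) then "<has_cap> " ++ t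
                else if (PySem.Str.lower t != t) && (PySem.Str.upper t == t) then "<all_cap> " ++ t
                else t]) [] l) := by
  rw [acs_foldl_append, List.nil_append, acs_map2]

-- ===== VERDICT (by name: the statement is the Claim_ definition above) =====
theorem add_capital_signs_spec : Claim_equal_add_capital_signs := by
  intro text _
  show add_capital_signs text = add_capital_signs_alt text
  exact acs_key (PySem.Str.split₀ text)
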